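-- pv_equiv track=rewrite | github.com/seoyeonhwng/algorithm | BJ/17140.py | get_new_arr
-- ===== SOURCE A (Python) =====
-- from collections import Counter, defaultdict
--
-- def get_new_arr(arr):
--     if len(arr) > 100:
--         arr = arr[:100]
--
--     counts = defaultdict(int)
--     for a in arr:
--         if a > 0:
--             counts[a] += 1
--
--     new_arr = []
--     for k, v in sorted(counts.items(), key=lambda x:(x[1], x[0])):
--         new_arr += [k, v]
--     return new_arr
-- ===== SOURCE B (Python) =====
-- def _runs(xs):
--     # maximal runs of equal adjacent values: [(value, run_length), ...]
--     if not xs: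
--         return []
--     x = xs[0]
--     i = 1
--     while i < len(xs) and xs[i] == x:
--         i += 1
--     return [(x, i)] + _runs(xs[i:])
--
-- def get_new_arr(arr):
--     pos = sorted(x for x in arr[:100] if x > 0)
--     pairs = sorted(_runs(pos), key=lambda p: (p[1], p[0]))
--     out = []
--     for k, c in pairs:
--         out.append(k)
--         out.append(c)
--     return out
-- ===== Notes on version B (the rewrite author's own statement) =====
-- stated objective: alternative
-- what changed: Replaces the defaultdict counting pass with sort-then-group: filter positives, sort them, split the sorted list into maximal runs (value, run length) by recursion, then sort the run pairs by (count, value) and flatten.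
import Mathlib
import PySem

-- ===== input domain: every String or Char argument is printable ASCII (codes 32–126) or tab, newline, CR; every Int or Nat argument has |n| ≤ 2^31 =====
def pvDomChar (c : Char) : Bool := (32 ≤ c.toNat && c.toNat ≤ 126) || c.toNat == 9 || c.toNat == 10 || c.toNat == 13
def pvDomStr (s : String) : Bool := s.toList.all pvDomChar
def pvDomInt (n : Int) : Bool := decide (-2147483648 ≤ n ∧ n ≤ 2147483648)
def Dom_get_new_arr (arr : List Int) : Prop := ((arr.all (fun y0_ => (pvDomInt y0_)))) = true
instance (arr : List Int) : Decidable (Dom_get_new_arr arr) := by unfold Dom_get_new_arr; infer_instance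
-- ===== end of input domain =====

-- B replaces A's dict-counting pass by sort-then-group-into-runs (alternative decomposition, same result).

-- ===== PORT A =====
-- Python tuple keys compare lexicographically, so key=lambda x:(x[1],x[0]) is the Lex order on (x.2, x.1).
def get_new_arr (arr : List Int) : List Int :=
  let arr' := if arr.length > 100 then PySem.List.slice arr none (some 100) else arr
  let counts := arr'.foldl (fun d a => if a > 0 then d.insert a (d.getD a 0 + 1) else d)
    (PySem.Dict.empty : PySem.Dict Int Int)
  (PySem.List.sorted counts.items (fun x => toLex (x.2, x.1))).foldl
    (fun new_arr p => new_arr ++ [p.1, p.2]) []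

-- ===== PORT B =====
-- _runs: i = 1 + length of the prefix of the tail equal to the head; the recursive call is on xs[i:].
def pvRuns : List Int → List (Int × Int)
  | [] => []
  | x :: r =>
    (x, ((r.takeWhile (fun y => y == x)).length : Int) + 1) :: pvRuns (r.dropWhile (fun y => y == x))
termination_by xs => xs.length
decreasing_by
  have := List.length_dropWhile_le (fun y => y == x) r
  simp; omega

def get_new_arr_alt (arr : List Int) : List Int :=
  let pos := PySem.List.sorted
    ((PySem.List.slice arr none (some 100)).filter (fun x => x > 0)) (fun x => x)
  let pairs := PySem.List.sorted (pvRuns pos) (fun p => toLex (p.2, p.1))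
  pairs.foldl (fun out p => (out ++ [p.1]) ++ [p.2]) []

-- ===== PRECONDITION & SPEC =====
def Spec_get_new_arr (arr : List Int) (out : List Int) : Prop := out = get_new_arr_alt arr
instance (arr : List Int) (out : List Int) : Decidable (Spec_get_new_arr arr out) := by unfold Spec_get_new_arr; infer_instance

-- ===== CLAIM (what is proved, stated in full; the proofs are below) =====
def Claim_equal_get_new_arr : Prop := ∀ (arr : List Int), Dom_get_new_arr arr → Spec_get_new_arr arr (get_new_arr arr)

-- ===== LEMMAS AND PROOFS =====

theorem pv_trunc_eq (arr : List Int) :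
    (if arr.length > 100 then PySem.List.slice arr none (some 100) else arr)
      = PySem.List.slice arr none (some 100) := by
  split_ifs with h
  · rfl
  · rw [PySem.List.slice_to arr (by norm_num : (0:Int) ≤ 100)]
    exact (List.take_of_length_le (by omega)).symm

theorem pv_not_mem_dropWhile (x : Int) (r : List Int)
    (hx : ∀ y ∈ r, x ≤ y) (hr : r.Pairwise (· ≤ ·)) :
    x ∉ r.dropWhile (fun y => y == x) := by
  cases hd : r.dropWhile (fun y => y == x) with
  | nil => simp
  | cons h d' =>
    have hh_ne' : h ≠ x := by
      have := List.head?_dropWhile_not (fun y => y == x) r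
      rw [hd] at this
      simpa using this
    have hsub : (r.dropWhile (fun y => y == x)).Sublist r := List.dropWhile_sublist _
    have hpair : (h :: d').Pairwise (· ≤ ·) := hd ▸ hr.sublist hsub
    intro hxmem
    rcases List.mem_cons.mp hxmem with hxeq | hxd'
    · exact hh_ne' hxeq.symm
    · have hle : h ≤ x := (List.pairwise_cons.mp hpair).1 x hxd'
      have hge : x ≤ h := hx h (hsub.mem (hd ▸ List.mem_cons_self))
      exact hh_ne' (le_antisymm hle hge)

theorem pv_runs_mem (xs : List Int) (hs : xs.Pairwise (· ≤ ·)) (k c : Int) :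
    (k, c) ∈ pvRuns xs ↔ k ∈ xs ∧ c = (xs.count k : Int) := by
  induction xs using pvRuns.induct with
  | case1 => simp [pvRuns]
  | case2 x r ih =>
    rw [pvRuns]
    set t := r.takeWhile (fun y => y == x) with ht
    set d := r.dropWhile (fun y => y == x) with hdd
    have hx : ∀ y ∈ r, x ≤ y := fun y hy => (List.pairwise_cons.mp hs).1 y hy
    have hr : r.Pairwise (· ≤ ·) := (List.pairwise_cons.mp hs).2
    have hd : d.Pairwise (· ≤ ·) := hr.sublist (List.dropWhile_sublist _)
    have hxd : x ∉ d := pv_not_mem_dropWhile x r hx hr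
    have htd : t ++ d = r := List.takeWhile_append_dropWhile
    have ht_all : ∀ y ∈ t, y = x := by
      intro y hy
      have := List.mem_takeWhile_imp hy
      simpa using this
    have hcount_t : t.count x = t.length := by
      exact List.count_eq_length.mpr (fun b hb => (ht_all b hb).symm)
    have hcount_t' : ∀ m : Int, m ≠ x → t.count m = 0 :=
      fun m hm => List.count_eq_zero.mpr (fun hmem => hm (ht_all m hmem))
    have hcount : ∀ m : Int, (x :: r).count m
        = (if m = x then 1 else 0) + t.count m + d.count m := by
      intro m
      rw [← htd, List.count_cons, List.count_append]
      by_cases hm : m = x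
      · subst hm
        simp
        omega
      · have hbe : (x == m) = false := beq_eq_false_iff_ne.mpr (Ne.symm hm)
        simp [hbe, hm]
    by_cases hk : k = x
    · subst hk
      have hcd : d.count k = 0 := List.count_eq_zero.mpr hxd
      have hckk : (k :: r).count k = t.length + 1 := by
        rw [hcount k, hcount_t, hcd]
        simp
        omega
      constructor
      · intro h
        rcases List.mem_cons.mp h with heq | hmem
        · have hc : c = (t.length : Int) + 1 := by
            simpa using congrArg Prod.snd heq
          refine ⟨List.mem_cons_self, ?_⟩
          rw [hckk]
          push_cast
          omega
        · exact absurd ((ih hd).mp hmem).1 hxd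
      · rintro ⟨-, hc⟩
        have hc' : c = (t.length : Int) + 1 := by
          rw [hc, hckk]
          push_cast
          ring
        exact List.mem_cons.mpr (Or.inl (by rw [hc']))
    · have hck : (x :: r).count k = d.count k := by
        rw [hcount k, hcount_t' k hk]
        simp [hk]
      constructor
      · intro h
        rcases List.mem_cons.mp h with heq | hmem
        · exact absurd (by simpa using congrArg Prod.fst heq) hk
        · obtain ⟨hkd, hcc⟩ := (ih hd).mp hmem
          refine ⟨List.mem_cons.mpr (Or.inr (htd ▸ List.mem_append.mpr (Or.inr hkd))), ?_⟩
          rw [hck]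
          exact hcc
      · rintro ⟨hkm, hc⟩
        have hkd : k ∈ d := by
          rcases List.mem_cons.mp hkm with rfl | hmr
          · exact absurd rfl hk
          · rcases List.mem_append.mp (htd ▸ hmr) with hmt | hmd
            · exact absurd (ht_all k hmt) hk
            · exact hmd
        rw [hck] at hc
        exact List.mem_cons.mpr (Or.inr ((ih hd).mpr ⟨hkd, hc⟩))

theorem pv_runs_nodup (xs : List Int) (hs : xs.Pairwise (· ≤ ·)) :
    (pvRuns xs).Nodup := by
  induction xs using pvRuns.induct with
  | case1 => simp [pvRuns]
  | case2 x r ih =>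
    have hx : ∀ y ∈ r, x ≤ y := fun y hy => (List.pairwise_cons.mp hs).1 y hy
    have hr : r.Pairwise (· ≤ ·) := (List.pairwise_cons.mp hs).2
    have hd : (r.dropWhile (fun y => y == x)).Pairwise (· ≤ ·) :=
      hr.sublist (List.dropWhile_sublist _)
    have hxd : x ∉ r.dropWhile (fun y => y == x) := pv_not_mem_dropWhile x r hx hr
    rw [pvRuns]
    refine List.nodup_cons.mpr ⟨?_, ih hd⟩
    intro hmem
    exact hxd ((pv_runs_mem _ hd x _).mp hmem).1

theorem pv_key_inj : Function.Injective (fun p : Int × Int => toLex (p.2, p.1)) := by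
  rintro ⟨a, b⟩ ⟨c, e⟩ h
  have h' : ((b, a) : Int × Int) = (e, c) := toLex.injective h
  simp [Prod.ext_iff] at h' ⊢
  exact ⟨h'.2, h'.1⟩

theorem pv_perm (l : List Int) :
    ((PySem.Set.ofList l).map (fun k => (k, (l.count k : Int)))).Perm
      (pvRuns (PySem.List.sorted l (fun x => x) false)) := by
  set s := PySem.List.sorted l (fun x => x) false with hsdef
  have hperm : s.Perm l := PySem.List.sorted_perm l (fun x => x) false
  have hsorted : s.Pairwise (· ≤ ·) := by
    have := PySem.List.sorted_pairwise l (fun x => x)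
    simpa using this
  have hnodL : ((PySem.Set.ofList l).map (fun k => (k, (l.count k : Int)))).Nodup := by
    refine (PySem.Set.nodup_ofList l).map ?_
    intro a b h
    exact congrArg Prod.fst h
  have hnodR : (pvRuns s).Nodup := pv_runs_nodup s hsorted
  rw [List.perm_ext_iff_of_nodup hnodL hnodR]
  rintro ⟨k, c⟩
  rw [pv_runs_mem s hsorted k c]
  constructor
  · intro hm
    rcases List.mem_map.mp hm with ⟨a, ha, hae⟩
    obtain ⟨rfl, rfl⟩ : a = k ∧ (l.count a : Int) = c := by
      simpa [Prod.ext_iff] using hae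
    refine ⟨hperm.mem_iff.mpr ((PySem.Set.mem_ofList _ _).mp ha), ?_⟩
    rw [hperm.count_eq]
  · rintro ⟨hk, rfl⟩
    refine List.mem_map.mpr ⟨k, (PySem.Set.mem_ofList _ _).mpr (hperm.mem_iff.mp hk), ?_⟩
    rw [hperm.count_eq]

-- ===== VERDICT (by name: the statement is the Claim_ definition above) =====
theorem get_new_arr_spec : Claim_equal_get_new_arr := by
  intro arr _
  show get_new_arr arr = get_new_arr_alt arr
  unfold get_new_arr get_new_arr_alt
  simp only [pv_trunc_eq]
  set L := PySem.List.slice arr none (some 100) with hL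
  set base := L.filter (fun x => decide (x > 0)) with hbase
  have hcounts :
      (L.foldl (fun d a => if a > 0 then d.insert a (d.getD a 0 + 1) else d)
        (PySem.Dict.empty : PySem.Dict Int Int)).items
        = (PySem.Set.ofList base).map (fun k => (k, (base.count k : Int))) := by
    have h1 := PySem.List.foldl_ite_eq_foldl_filter (fun a : Int => a > 0)
      (fun (d : PySem.Dict Int Int) (a : Int) => d.insert a (d.getD a 0 + 1)) L
      (PySem.Dict.empty : PySem.Dict Int Int)
    rw [h1, PySem.Dict.foldl_insert_getD_add_one_eq_counter]
    exact PySem.Dict.items_counter base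
  rw [hcounts]
  have hsorteq :
      PySem.List.sorted ((PySem.Set.ofList base).map (fun k => (k, (base.count k : Int))))
        (fun x => toLex (x.2, x.1)) false
      = PySem.List.sorted (pvRuns (PySem.List.sorted base (fun x => x) false))
        (fun p => toLex (p.2, p.1)) false :=
    PySem.List.sorted_eq_sorted_of_perm _ _ _ pv_key_inj (pv_perm base)
  rw [hsorteq]
  have hfun : ∀ (l : List (Int × Int)) (init : List Int),
      l.foldl (fun na p => na ++ [p.1, p.2]) init
        = l.foldl (fun out p => (out ++ [p.1]) ++ [p.2]) init := by
    intro l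
    induction l with
    | nil => intro init; rfl
    | cons p l ihl =>
      intro init
      simp only [List.foldl_cons, List.append_assoc, List.singleton_append, ihl]
  exact hfun _ []
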